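-- pv_equiv track=rewrite | github.com/pc5401/my_BOJ | 백준/Silver/9237. 이장님 초대/이장님 초대.py | solve
-- ===== SOURCE A (Python) =====
-- def solve(N: int, trees: list[int]) -> int:
--     Q = sorted(trees)
--
--     end_day = Q.pop()
--     while Q:
--         end_day -= 1
--         tree = Q.pop()
--         if tree > end_day:
--             end_day = tree
--
--     return N + end_day + 1
-- ===== SOURCE B (Python) =====
-- def solve(N: int, trees: list[int]) -> int:
--     # latest finish day = max over ascending-sorted trees of (value - index);
--     # one independent per-element reduction instead of the destructive pop loop.
--     return N + 1 + max(v - i for i, v in enumerate(sorted(trees)))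
-- ===== Notes on version B (the rewrite author's own statement) =====
-- stated objective: simpler
-- what changed: Replaces the destructive pop/decrement loop with a closed-form single reduction: the answer is N + 1 + max(v - i) over the ascending-sorted list, since the recurrence end_day = max(tree, end_day - 1) collapses to that maximum.
import Mathlib
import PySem

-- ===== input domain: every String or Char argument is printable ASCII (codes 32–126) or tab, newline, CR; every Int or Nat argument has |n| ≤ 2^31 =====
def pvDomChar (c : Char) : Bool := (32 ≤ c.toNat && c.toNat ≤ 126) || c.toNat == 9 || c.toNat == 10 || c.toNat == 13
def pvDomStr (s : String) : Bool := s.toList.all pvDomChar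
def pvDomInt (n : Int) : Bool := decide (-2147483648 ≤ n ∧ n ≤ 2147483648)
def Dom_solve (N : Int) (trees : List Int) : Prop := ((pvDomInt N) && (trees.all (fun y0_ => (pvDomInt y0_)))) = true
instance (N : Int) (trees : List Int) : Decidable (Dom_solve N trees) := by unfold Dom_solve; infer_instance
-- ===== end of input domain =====

-- B replaces A's destructive pop/decrement loop by max(v - i) over the sorted list (simpler, same cost).

-- ===== PORT A =====
-- the while loop: each iteration decrements end_day, pops the largest remaining tree
-- (= next element of the reversed sorted list), and resets end_day if the tree is later.
def solveLoop : Int → List Int → Int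
  | end_day, [] => end_day
  | end_day, tree :: Q =>
      let e1 := end_day - 1
      solveLoop (if tree > e1 then tree else e1) Q

def solve (N : Int) (trees : List Int) : Int :=
  -- Q.pop() takes from the end of the sorted list = head of its reverse
  match (PySem.List.sorted trees (fun x => x) false).reverse with
  | [] => 0   -- Python raises IndexError here; excluded by Pre_solve
  | end_day :: Q => N + solveLoop end_day Q + 1

-- ===== PORT B =====
def solve_alt (N : Int) (trees : List Int) : Int :=
  match PySem.List.max? ((PySem.List.enumerate (PySem.List.sorted trees (fun x => x) false) 0).map (fun p => p.2 - p.1)) (fun x => x) with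
  | some m => N + 1 + m
  | none => 0   -- Python's max raises ValueError here; excluded by Pre_solve

-- ===== PRECONDITION & SPEC =====
-- A raises IndexError (and B ValueError) on an empty list: excluded.
def Pre_solve (N : Int) (trees : List Int) : Prop := trees ≠ []
instance (N : Int) (trees : List Int) : Decidable (Pre_solve N trees) := by unfold Pre_solve; infer_instance
def pvWitness_solve : Int × List Int := (3, [2, 4, 1])

def Spec_solve (N : Int) (trees : List Int) (out : Int) : Prop := out = solve_alt N trees
instance (N : Int) (trees : List Int) (out : Int) : Decidable (Spec_solve N trees out) := by unfold Spec_solve; infer_instance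

-- ===== CLAIM (what is proved, stated in full; the proofs are below) =====
def Claim_equal_solve : Prop := ∀ (N : Int) (trees : List Int), Dom_solve N trees → Pre_solve N trees → Spec_solve N trees (solve N trees)

-- ===== LEMMAS AND PROOFS =====

lemma foldl_max_comm (xs : List Int) (i y : Int) :
    xs.foldl max (max i y) = max (xs.foldl max i) y := by
  induction xs generalizing i with
  | nil => simp
  | cons x t ih => simp only [List.foldl_cons, max_right_comm i y x, ih]

lemma foldl_max_concat (xs : List Int) (i y : Int) :
    (xs ++ [y]).foldl max i = max (xs.foldl max i) y := by
  simp [List.foldl_append]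

lemma max?_id_concat (xs : List Int) (y : Int) :
    PySem.List.max? (xs ++ [y]) (fun x => x) = some (xs.foldl max y) := by
  cases xs with
  | nil => simp [PySem.List.max?_id_cons]
  | cons c t =>
      rw [List.cons_append, PySem.List.max?_id_cons, foldl_max_concat]
      simp only [List.foldl_cons, Option.some_inj]
      rw [max_comm y c, foldl_max_comm]

lemma solveLoop_rev (l : List Int) (e : Int) :
    solveLoop e l.reverse
      = ((PySem.List.enumerate l 0).map (fun p => p.2 - p.1)).foldl max (e - l.length) := by
  induction l using List.reverseRecOn generalizing e with
  | nil => simp [solveLoop, PySem.List.enumerate]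
  | append_singleton l' x ih =>
      rw [List.reverse_append, List.reverse_singleton, List.singleton_append]
      show solveLoop (if x > e - 1 then x else e - 1) l'.reverse = _
      simp only [ih, PySem.List.enumerate_append, List.map_append, PySem.List.enumerate_cons,
        PySem.List.enumerate_nil, List.map_cons, List.map_nil, foldl_max_concat,
        List.length_append, List.length_singleton, zero_add]
      push_cast
      have h1 : (if x > e - 1 then x else e - 1) - (l'.length : Int)
          = max (e - ((l'.length : Int) + 1)) (x - (l'.length : Int)) := by
        rcases le_or_gt x (e - 1) with h | h
        · rw [if_neg (by omega), max_eq_left (by omega)]; ring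
        · rw [if_pos h, max_eq_right (by omega)]
      rw [h1, foldl_max_comm]

lemma solve_eq_alt (N : Int) (trees : List Int) (h : trees ≠ []) :
    solve N trees = solve_alt N trees := by
  set s := PySem.List.sorted trees (fun x => x) false with hs
  have hsne : s ≠ [] := by
    rw [hs, Ne, PySem.List.sorted_eq_nil_iff]; exact h
  obtain ⟨l', x, hsplit⟩ := List.eq_nil_or_concat s |>.resolve_left hsne
  have hmap : (PySem.List.enumerate s 0).map (fun p : Int × Int => p.2 - p.1)
      = (PySem.List.enumerate l' 0).map (fun p : Int × Int => p.2 - p.1)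
        ++ [x - (0 + (l'.length : Int))] := by
    rw [hsplit, List.concat_eq_append, PySem.List.enumerate_append, List.map_append,
        PySem.List.enumerate_cons, PySem.List.enumerate_nil]
    simp
  have hrev : s.reverse = x :: l'.reverse := by rw [hsplit]; simp
  unfold solve solve_alt
  simp only [← hs, hrev, hmap, max?_id_concat, solveLoop_rev, zero_add]
  omega

-- ===== VERDICT (by name: the statement is the Claim_ definition above) =====
theorem solve_spec : Claim_equal_solve := by
  intro N trees _ hpre
  unfold Spec_solve
  exact solve_eq_alt N trees hpre
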